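-- pv_equiv track=rewrite | github.com/ysmneok/listening-experience-information-extraction-sci6203 | pipeline_statistical/features/descriptor_extraction.py | extract_corpus_descriptors
-- ===== SOURCE A (Python) =====
-- from typing import List, Dict, Set, Tuple
--
-- def extract_descriptors(
--     tokens: List[str],
--     lexicon: Set[str]
-- ) -> Tuple[Dict[str, int], Dict[str, int]]:
--     """
--     Extract descriptor counts and binary presence from a tokenized document.
--
--     Parameters
--     ----------
--     tokens : List[str]
--         Tokenized document (already normalized).
--     lexicon : Set[str]
--         Controlled vocabulary (normalized surface forms).
--
--     Returns
--     -------
--     counts : Dict[str, int]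
--         Descriptor -> frequency
--     binary : Dict[str, int]
--         Descriptor -> 0/1 presence
--     """
--     counts: Dict[str, int] = {}
--
--     for tok in tokens:
--         if tok in lexicon:
--             counts[tok] = counts.get(tok, 0) + 1
--
--     binary = {k: 1 for k in counts}
--
--     return counts, binary
--
-- def extract_corpus_descriptors(
--     corpus_tokens: Dict[str, List[str]],
--     lexicon: Set[str]
-- ) -> Tuple[List[Dict[str, int]], List[Dict[str, int]]]:
--     """
--     Apply descriptor extraction to an entire corpus.
--
--     Parameters
--     ----------
--     corpus_tokens : Dict[doc_id, List[str]]
--         Tokenized corpus.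
--     lexicon : Set[str]
--
--     Returns
--     -------
--     counts_list : List[Dict[str, int]]
--         One dict per document.
--     binary_list : List[Dict[str, int]]
--         One dict per document.
--     """
--     counts_list = []
--     binary_list = []
--
--     for tokens in corpus_tokens.values():
--         counts, binary = extract_descriptors(tokens, lexicon)
--         counts_list.append(counts)
--         binary_list.append(binary)
--
--     return counts_list, binary_list
-- ===== SOURCE B (Python) =====
-- def extract_corpus_descriptors(corpus_tokens, lexicon):
--     counts_list = []
--     binary_list = []
--     for tokens in corpus_tokens.values():
--         counts = {}
--         binary = {}
--         remaining = list(tokens)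
--         while remaining:
--             head = remaining[0]
--             c = remaining.count(head)
--             remaining = [t for t in remaining if t != head]
--             if head in lexicon:
--                 counts[head] = c
--                 binary[head] = 1
--         counts_list.append(counts)
--         binary_list.append(binary)
--     return counts_list, binary_list
-- ===== Notes on version B (the rewrite author's own statement) =====
-- stated objective: alternative
-- what changed: Per document, instead of a single token pass accumulating a counter dict and then a key comprehension for presence, B runs a shrinking worklist partition loop: it repeatedly takes the first remaining token, counts its occurrences, deletes all of them from the worklist, and records count and presence together when the token is in the lexicon.
import Mathlib
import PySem

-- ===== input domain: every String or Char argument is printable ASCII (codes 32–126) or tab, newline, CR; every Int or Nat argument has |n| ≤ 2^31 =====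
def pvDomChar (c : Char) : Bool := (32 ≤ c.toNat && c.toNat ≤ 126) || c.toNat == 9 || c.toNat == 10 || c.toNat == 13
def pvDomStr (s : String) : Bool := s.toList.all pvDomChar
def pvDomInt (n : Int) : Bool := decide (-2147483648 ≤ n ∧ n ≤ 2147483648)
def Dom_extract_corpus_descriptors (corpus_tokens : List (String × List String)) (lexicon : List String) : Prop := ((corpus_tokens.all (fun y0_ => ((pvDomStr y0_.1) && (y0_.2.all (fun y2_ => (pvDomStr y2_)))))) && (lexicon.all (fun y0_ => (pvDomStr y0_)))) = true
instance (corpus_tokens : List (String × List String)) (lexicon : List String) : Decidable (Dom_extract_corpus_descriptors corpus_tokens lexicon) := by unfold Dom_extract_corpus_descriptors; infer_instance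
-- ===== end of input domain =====

-- B replaces A's accumulating counter pass + key comprehension with a shrinking worklist partition
-- loop per document (take first remaining token, count it, delete all its occurrences, record count
-- and presence together); alternative structure, same results.


-- ===== PORT A =====
-- helper: extract_descriptors(tokens, lexicon) — single pass over tokens accumulating a counts dict;
-- the dict comprehension {k: 1 for k in counts} iterates the (distinct) keys of counts, i.e. maps each item to (key, 1)
def pvExtractDescriptorsA (tokens : List String) (lexicon : List String) : List (String × Int) × List (String × Int) :=
  let counts := tokens.foldl
    (fun counts tok => if lexicon.contains tok then counts.insert tok (counts.getD tok 0 + 1) else counts)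
    PySem.Dict.empty
  (counts.items, counts.items.map (fun p => (p.1, (1 : Int))))

def extract_corpus_descriptors (corpus_tokens : List (String × List String)) (lexicon : List String) : (List (List (String × Int))) × (List (List (String × Int))) :=
  corpus_tokens.foldl
    (fun acc kv =>
      let r := pvExtractDescriptorsA kv.2 lexicon
      (acc.1 ++ [r.1], acc.2 ++ [r.2]))
    ([], [])

-- ===== PORT B =====
-- helper: B's per-document worklist loop — take the first remaining token, count its occurrences,
-- delete all of them from the worklist, record (count, 1) when it is in the lexicon.
-- The while loop becomes recursion on `remaining`; it terminates because filtering out the head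
-- strictly shortens the list.
def pvDocB (remaining : List String) (lexicon : List String)
    (counts binary : PySem.Dict String Int) : PySem.Dict String Int × PySem.Dict String Int :=
  match remaining with
  | [] => (counts, binary)
  | head :: tail =>
    let c : Int := PySem.List.count (head :: tail) head
    let remaining' := tail.filter (fun t => t != head)
    if lexicon.contains head then
      pvDocB remaining' lexicon (counts.insert head c) (binary.insert head 1)
    else
      pvDocB remaining' lexicon counts binary
termination_by remaining.length
decreasing_by all_goals
  simp only [List.length_unattach]
  exact Nat.lt_succ_of_le (le_trans (List.length_filter_le _ _) (by simp))

def extract_corpus_descriptors_alt (corpus_tokens : List (String × List String)) (lexicon : List String) : (List (List (String × Int))) × (List (List (String × Int))) :=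
  corpus_tokens.foldl
    (fun acc kv =>
      let r := pvDocB kv.2 lexicon PySem.Dict.empty PySem.Dict.empty
      (acc.1 ++ [r.1.items], acc.2 ++ [r.2.items]))
    ([], [])

-- ===== PRECONDITION & SPEC =====
def Spec_extract_corpus_descriptors (corpus_tokens : List (String × List String)) (lexicon : List String) (out : (List (List (String × Int))) × (List (List (String × Int)))) : Prop := out = extract_corpus_descriptors_alt corpus_tokens lexicon
instance (corpus_tokens : List (String × List String)) (lexicon : List String) (out : (List (List (String × Int))) × (List (List (String × Int)))) : Decidable (Spec_extract_corpus_descriptors corpus_tokens lexicon out) := by unfold Spec_extract_corpus_descriptors; infer_instance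

-- ===== CLAIM (what is proved, stated in full; the proofs are below) =====
def Claim_equal_extract_corpus_descriptors : Prop := ∀ (corpus_tokens : List (String × List String)) (lexicon : List String), Dom_extract_corpus_descriptors corpus_tokens lexicon → Spec_extract_corpus_descriptors corpus_tokens lexicon (extract_corpus_descriptors corpus_tokens lexicon)

-- ===== LEMMAS AND PROOFS =====

-- ordered dedup commutes with filter
theorem pv_ofList_filter (xs : List String) (p : String → Bool) :
    PySem.Set.ofList (xs.filter p) = (PySem.Set.ofList xs).filter p := by
  induction xs with
  | nil => rfl
  | cons x xs ih =>
    by_cases hx : p x = true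
    · simp only [List.filter_cons_of_pos hx, PySem.Set.ofList_cons, ih, PySem.Set.discard,
        List.filter_filter]
      congr 1
      apply List.filter_congr
      intro a _
      exact Bool.and_comm _ _
    · simp only [List.filter_cons_of_neg hx, PySem.Set.ofList_cons, ih, PySem.Set.discard,
        List.filter_filter]
      apply List.filter_congr
      intro a ha
      by_cases hax : a = x
      · subst hax; simp [hx]
      · simp [hax]

-- characterisation of B's worklist loop: starting from accumulators whose keys avoid the worklist,
-- it appends one (descriptor, count) / (descriptor, 1) item per lexicon descriptor, in
-- first-occurrence order of the worklist.
theorem pv_docB_items_n (lexicon : List String) (n : Nat) : ∀ (r : List String), r.length ≤ n →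
    ∀ (counts binary : PySem.Dict String Int),
    (∀ t ∈ r, counts.contains t = false) →
    (∀ t ∈ r, binary.contains t = false) →
    (pvDocB r lexicon counts binary).1.items =
      counts.items ++ ((PySem.Set.ofList r).filter (fun t => lexicon.contains t)).map
        (fun k => (k, (r.count k : Int))) ∧
    (pvDocB r lexicon counts binary).2.items =
      binary.items ++ ((PySem.Set.ofList r).filter (fun t => lexicon.contains t)).map
        (fun k => (k, (1 : Int))) := by
  induction n with
  | zero =>
    intro r hr
    have : r = [] := List.eq_nil_of_length_eq_zero (Nat.le_zero.mp hr)
    subst this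
    intro counts binary _ _
    simp [pvDocB]
  | succ n ih0 =>
    intro r hr counts binary hc hb
    match r with
    | [] => simp [pvDocB]
    | head :: tail =>
      have hlen : (tail.filter (fun t => t != head)).length ≤ n := by
        have := List.length_filter_le (fun t => t != head) tail
        simp at hr
        omega
      have hmem : ∀ t ∈ tail.filter (fun t => t != head), t ∈ head :: tail := by
        intro t ht
        exact List.mem_cons_of_mem _ (List.mem_of_mem_filter ht)
      have hne : ∀ t ∈ tail.filter (fun t => t != head), t ≠ head := by
        intro t ht
        simpa using (List.of_mem_filter ht)
      -- first-occurrence structure of the worklist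
      have hset : PySem.Set.ofList (head :: tail) =
          head :: PySem.Set.ofList (tail.filter (fun t => t != head)) := by
        rw [pv_ofList_filter]
        simp only [PySem.Set.ofList_cons, PySem.Set.discard]
        rfl
      -- counts of survivors are unchanged by deleting head
      have hcount : ∀ k ∈ PySem.Set.ofList (tail.filter (fun t => t != head)),
          (tail.filter (fun t => t != head)).count k = (head :: tail).count k := by
        intro k hk
        have hkne : k ≠ head := by
          have := (PySem.List.mem_dedup _ k).mp hk
          exact hne k this
        rw [List.count_filter (by simpa using hkne)]
        simp [hkne, Ne.symm]
      by_cases hl : lexicon.contains head = true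
      · have ihr := ih0 (tail.filter (fun t => t != head)) hlen
          (counts.insert head (PySem.List.count (head :: tail) head))
          (binary.insert head 1)
          (by intro t ht
              rw [PySem.Dict.contains_insert]
              simp only [Bool.or_eq_false_iff]
              exact ⟨by simpa using hne t ht, hc t (hmem t ht)⟩)
          (by intro t ht
              rw [PySem.Dict.contains_insert]
              simp only [Bool.or_eq_false_iff]
              exact ⟨by simpa using hne t ht, hb t (hmem t ht)⟩)
        rw [pvDocB]
        simp only [hl, if_true]
        have hnc : counts.contains head = false := hc head (List.mem_cons_self)
        have hnb : binary.contains head = false := hb head (List.mem_cons_self)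
        rw [ihr.1, ihr.2] at *
        constructor
        · rw [PySem.Dict.items_insert_of_not_contains _ _ hnc, hset]
          simp only [List.filter_cons, hl, if_true, List.map_cons, List.append_assoc,
            List.cons_append, List.nil_append, PySem.List.count_eq]
          congr 2
          apply List.map_congr_left
          intro k hk
          have := hcount k (List.mem_filter.mp hk).1
          simp [this]
        · have hm : head ∈ lexicon := by simpa using hl
          rw [PySem.Dict.items_insert_of_not_contains _ _ hnb, hset]
          simp [hm]
      · have hlf : lexicon.contains head = false := by simpa using hl
        have ihr := ih0 (tail.filter (fun t => t != head)) hlen counts binary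
          (fun t ht => hc t (hmem t ht)) (fun t ht => hb t (hmem t ht))
        rw [pvDocB]
        simp only [hlf, Bool.false_eq_true, if_false]
        rw [ihr.1, ihr.2]
        have hfilter : ((PySem.Set.ofList (head :: tail)).filter (fun t => lexicon.contains t)) =
            ((PySem.Set.ofList (tail.filter (fun t => t != head))).filter
              (fun t => lexicon.contains t)) := by
          have hnotmem : head ∉ lexicon := by simpa using hlf
          rw [hset]
          simp [hnotmem]
        constructor
        · rw [hfilter]
          congr 1
          apply List.map_congr_left
          intro k hk
          have := hcount k (List.mem_filter.mp hk).1
          simp [this]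
        · rw [hfilter]

-- the per-document equivalence: A's counter items are exactly what B's worklist loop produces
theorem pv_doc_eq (tokens lexicon : List String) :
    pvExtractDescriptorsA tokens lexicon =
      ((pvDocB tokens lexicon PySem.Dict.empty PySem.Dict.empty).1.items,
       (pvDocB tokens lexicon PySem.Dict.empty PySem.Dict.empty).2.items) := by
  have hB := pv_docB_items_n lexicon tokens.length tokens (le_refl _) PySem.Dict.empty PySem.Dict.empty
    (by intro t _; simp [PySem.Dict.contains_empty]) (by intro t _; simp [PySem.Dict.contains_empty])
  have hA : (tokens.foldl
      (fun counts tok => if lexicon.contains tok then counts.insert tok (counts.getD tok 0 + 1) else counts)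
      (PySem.Dict.empty : PySem.Dict String Int)).items =
      ((PySem.Set.ofList tokens).filter (fun t => lexicon.contains t)).map
        (fun k => (k, (tokens.count k : Int))) := by
    rw [← List.foldl_filter, PySem.Dict.foldl_insert_getD_add_one_eq_counter,
      PySem.Dict.items_counter, pv_ofList_filter]
    apply List.map_congr_left
    intro k hk
    have hpk : lexicon.contains k = true := (List.mem_filter.mp hk).2
    simp only [List.count_filter hpk]
  have hemp : (PySem.Dict.empty : PySem.Dict String Int).items = [] := rfl
  unfold pvExtractDescriptorsA
  rw [hB.1, hB.2, hemp]
  simp only [List.nil_append]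
  refine Prod.ext ?_ ?_
  · exact hA
  · show _ = _
    rw [hA]
    simp [List.map_map, Function.comp]

-- ===== VERDICT (by name: the statement is the Claim_ definition above) =====
theorem extract_corpus_descriptors_spec : Claim_equal_extract_corpus_descriptors := by
  intro corpus_tokens lexicon _
  simp only [Spec_extract_corpus_descriptors, extract_corpus_descriptors,
    extract_corpus_descriptors_alt, pv_doc_eq]
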